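-- pv_equiv track=rewrite | github.com/opencybersecurityalliance/stix-shifter | stix_shifter_dependencies/lib/python3.9/site-packages/stix2matcher/matcher.py | _bound_largest_combination
-- ===== SOURCE A (Python) =====
-- def _tuple_size(value):
--     """
--     return number of non-None elements
--     """
--     return sum(idx is not None for idx in value)
--
-- def _ceildiv(a, b):
--     return -(-a // b)
--
-- def _bound_largest_combination(value_list):
--     """
--     Returns an upper bound on the largest disjoint combination
--
--     Given a valid combination of disjoint tuples, replacing a tuple
--     with a sub-tuple (smaller and included) leads to a valid combination
--     of the same size. Thus we can bound size of largest possible combination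
--     by considering small tuples first.
--
--     :param value_list: List of tuples of obs (internal) ids
--     """
--     if value_list == []:
--         return 0
--
--     # First get max tuple size
--     max_size = max(_tuple_size(value) for value in value_list)
--
--     # init array of sets of obs_idx
--     obs_idx = [set() for _ in range(max_size + 1)]
--     for value in value_list:
--         obs_idx[_tuple_size(value)] |= {idx for idx in value if idx is not None}
--
--     # build largest combination
--     # considering that all possible tuples are availables
--     consumed_idx = set()
--     combination_size = 0
--     for i in range(1, max_size):
--         available_idx = obs_idx[i] - consumed_idx
--         # each tuple consumes i idx
--         # (rounded up since we remove all idx from bigger tuples)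
--         combination_size += _ceildiv(len(available_idx), i)
--         # update mark all idx as consumed
--         consumed_idx |= available_idx
--     # last size does not need rounding up
--     available_idx = obs_idx[max_size] - consumed_idx
--     combination_size += len(available_idx) // max_size
--     return combination_size
-- ===== SOURCE B (Python) =====
-- def _tuple_size(value):
--     return sum(idx is not None for idx in value)
--
-- def _ceildiv(a, b):
--     return -(-a // b)
--
-- def _bound_largest_combination(value_list):
--     if value_list == []:
--         return 0
--     # minimal tuple size in which each non-None index occurs
--     min_size = {}
--     max_size = 0
--     for value in value_list:
--         size = _tuple_size(value)
--         if size > max_size: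
--             max_size = size
--         for idx in value:
--             if idx is not None and (idx not in min_size or size < min_size[idx]):
--                 min_size[idx] = size
--     # tally indices by minimal size
--     counts = {}
--     for size in min_size.values():
--         counts[size] = counts.get(size, 0) + 1
--     total = 0
--     for i in range(1, max_size):
--         total += _ceildiv(counts.get(i, 0), i)
--     total += counts.get(max_size, 0) // max_size
--     return total
-- ===== Notes on version B (the rewrite author's own statement) =====
-- stated objective: alternative
-- what changed: Replaces A's array of per-size index sets plus a consumed-set sweep by a single pass building a dict of each index's minimal tuple size, then a tally counts[size] summed with ceil-division (floor for the largest size).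
import Mathlib
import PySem

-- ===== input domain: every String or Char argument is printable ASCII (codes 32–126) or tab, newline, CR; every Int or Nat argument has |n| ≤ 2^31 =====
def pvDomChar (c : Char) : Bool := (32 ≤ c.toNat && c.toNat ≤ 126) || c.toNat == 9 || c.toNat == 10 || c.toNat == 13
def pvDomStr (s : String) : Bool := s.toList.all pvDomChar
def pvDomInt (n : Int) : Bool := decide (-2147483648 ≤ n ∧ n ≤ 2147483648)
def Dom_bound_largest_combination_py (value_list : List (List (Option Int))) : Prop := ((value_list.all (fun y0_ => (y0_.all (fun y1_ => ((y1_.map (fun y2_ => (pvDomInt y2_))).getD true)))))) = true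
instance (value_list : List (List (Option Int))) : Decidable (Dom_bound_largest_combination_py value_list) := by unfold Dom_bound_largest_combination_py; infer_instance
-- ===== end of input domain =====

-- B replaces A's per-size index-set array and consumed-set sweep by a single dict of minimal
-- tuple sizes per index plus a tally per size (objective: alternative decomposition, same cost).


-- ===== PORT A =====
-- _tuple_size: sum(idx is not None for idx in value)
def pvTupleSize (value : List (Option Int)) : Int :=
  value.foldl (fun acc idx => acc + (if idx.isSome then 1 else 0)) 0

-- _ceildiv(a, b) = -(-a // b)
def pvCeildiv (a b : Int) : Int := -(PySem.Int.floordiv (-a) b)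

def bound_largest_combination_py (value_list : List (List (Option Int))) : Int :=
  if value_list = [] then 0
  else
    -- max_size = max(_tuple_size(value) for value in value_list)  (list nonempty here)
    let max_size : Int :=
      (PySem.List.max? (value_list.map (fun value => pvTupleSize value)) (fun x => x)).getD 0
    -- obs_idx = [set() for _ in range(max_size + 1)]
    let obs_idx : List (PySem.Set Int) :=
      (PySem.List.pyRange 0 (max_size + 1) 1).map (fun _ => PySem.Set.empty)
    -- for value in value_list: obs_idx[_tuple_size(value)] |= {idx for idx in value if idx is not None}
    let obs_idx := value_list.foldl
      (fun obs value =>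
        PySem.List.pySetD obs (pvTupleSize value)
          (PySem.Set.union (PySem.List.pyGetD obs (pvTupleSize value) PySem.Set.empty)
            (PySem.Set.ofList (value.filterMap (fun idx => idx)))))
      obs_idx
    -- consumed_idx = set(); combination_size = 0; for i in range(1, max_size): ...
    let st := (PySem.List.pyRange 1 max_size 1).foldl
      (fun (st : PySem.Set Int × Int) i =>
        let available := PySem.Set.diff (PySem.List.pyGetD obs_idx i PySem.Set.empty) st.1
        (PySem.Set.union st.1 available, st.2 + pvCeildiv (PySem.Set.len available) i))
      (PySem.Set.empty, 0)
    -- last size does not need rounding up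
    let available := PySem.Set.diff (PySem.List.pyGetD obs_idx max_size PySem.Set.empty) st.1
    st.2 + PySem.Int.floordiv (PySem.Set.len available) max_size

-- ===== PORT B =====
def pvTupleSizeAlt (value : List (Option Int)) : Int :=
  value.foldl (fun acc idx => acc + (if idx.isSome then 1 else 0)) 0

def pvCeildivAlt (a b : Int) : Int := -(PySem.Int.floordiv (-a) b)

def bound_largest_combination_py_alt (value_list : List (List (Option Int))) : Int :=
  if value_list = [] then 0
  else
    -- one pass: min_size[idx] = minimal tuple size containing idx; max_size = running max
    let st := value_list.foldl
      (fun (st : PySem.Dict Int Int × Int) value =>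
        let size := pvTupleSizeAlt value
        let max_size := if size > st.2 then size else st.2
        let min_size := value.foldl
          (fun d idx =>
            match idx with
            | none => d
            | some x => if !(d.contains x) || size < d.getD x 0 then d.insert x size else d)
          st.1
        (min_size, max_size))
      (PySem.Dict.empty, 0)
    let min_size := st.1
    let max_size := st.2
    -- counts[s] = number of indices whose minimal size is s
    let counts := min_size.values.foldl
      (fun c s => c.insert s (c.getD s 0 + 1)) PySem.Dict.empty
    let total := (PySem.List.pyRange 1 max_size 1).foldl
      (fun t i => t + pvCeildivAlt (counts.getD i 0) i) 0
    total + PySem.Int.floordiv (counts.getD max_size 0) max_size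

-- ===== PRECONDITION & SPEC =====
-- Pre_ excludes exactly the inputs where Python A raises (ZeroDivisionError 0 // 0): a nonempty
-- value_list all of whose elements are None (max_size = 0); Python B raises there as well.
def Pre_bound_largest_combination_py (value_list : List (List (Option Int))) : Prop :=
  value_list = [] ∨ ∃ v ∈ value_list, ∃ o ∈ v, o.isSome = true
instance (value_list : List (List (Option Int))) : Decidable (Pre_bound_largest_combination_py value_list) := by unfold Pre_bound_largest_combination_py; infer_instance

def pvWitness_bound_largest_combination_py : List (List (Option Int)) :=
  [[some 1, none], [some 2, some 3]]

def Spec_bound_largest_combination_py (value_list : List (List (Option Int))) (out : Int) : Prop := out = bound_largest_combination_py_alt value_list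
instance (value_list : List (List (Option Int))) (out : Int) : Decidable (Spec_bound_largest_combination_py value_list out) := by unfold Spec_bound_largest_combination_py; infer_instance

-- ===== CLAIM (what is proved, stated in full; the proofs are below) =====
def Claim_equal_bound_largest_combination_py : Prop := ∀ (value_list : List (List (Option Int))), Dom_bound_largest_combination_py value_list → Pre_bound_largest_combination_py value_list → Spec_bound_largest_combination_py value_list (bound_largest_combination_py value_list)

-- ===== LEMMAS AND PROOFS =====

def pvSzN (v : List (Option Int)) : Nat := v.countP (fun o => o.isSome)
def pvOcc (l : List (List (Option Int))) (x : Int) (n : Nat) : Prop :=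
  ∃ v ∈ l, pvSzN v = n ∧ some x ∈ v
def pvMaxN (l : List (List (Option Int))) : Nat :=
  l.foldl (fun m v => max m (pvSzN v)) 0

theorem pv_tsize_eq (v : List (Option Int)) : pvTupleSize v = (pvSzN v : Int) := by
  unfold pvTupleSize pvSzN
  rw [PySem.List.foldl_add, PySem.List.sum_map_ite_one_zero]
  simp

theorem pv_mem_filterMap_id (v : List (Option Int)) (x : Int) :
    x ∈ v.filterMap (fun o => o) ↔ some x ∈ v := by
  simp [List.mem_filterMap]

theorem pv_occ_pos {l : List (List (Option Int))} {x : Int} {n : Nat}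
    (h : pvOcc l x n) : 1 ≤ n := by
  obtain ⟨v, hv, hsz, hx⟩ := h
  have : 0 < v.countP (fun o => o.isSome) := by rw [List.countP_pos_iff]; exact ⟨some x, hx, rfl⟩
  unfold pvSzN at hsz; omega

def pvOmin (l : List (List (Option Int))) (x : Int) : Option Int :=
  l.foldl (fun o v => if some x ∈ v then
      some (o.elim ((pvSzN v : Int)) (min ((pvSzN v : Int)))) else o) none

theorem pv_omin_append (l : List (List (Option Int))) (v : List (Option Int)) (x : Int) :
    pvOmin (l ++ [v]) x = if some x ∈ v then
      some ((pvOmin l x).elim ((pvSzN v : Int)) (min ((pvSzN v : Int)))) else pvOmin l x := by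
  unfold pvOmin
  rw [List.foldl_append]
  rfl


theorem pv_occ_append (l : List (List (Option Int))) (v : List (Option Int)) (x : Int) (m : Nat) :
    pvOcc (l ++ [v]) x m ↔ pvOcc l x m ∨ (pvSzN v = m ∧ some x ∈ v) := by
  unfold pvOcc; constructor
  · rintro ⟨w, hw, hs, hx⟩
    rcases List.mem_append.mp hw with h | h
    · exact Or.inl ⟨w, h, hs, hx⟩
    · simp at h; subst h; exact Or.inr ⟨hs, hx⟩
  · rintro (⟨w, hw, hs, hx⟩ | ⟨hs, hx⟩)
    · exact ⟨w, List.mem_append.mpr (Or.inl hw), hs, hx⟩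
    · exact ⟨v, List.mem_append.mpr (Or.inr (by simp)), hs, hx⟩

theorem pv_omin_spec (l : List (List (Option Int))) (x : Int) :
    (pvOmin l x = none ∧ ∀ m, ¬ pvOcc l x m) ∨
    (∃ n : Nat, pvOmin l x = some (n : Int) ∧ pvOcc l x n ∧ ∀ m, pvOcc l x m → n ≤ m) := by
  induction l using List.reverseRecOn with
  | nil =>
    left
    constructor
    · simp [pvOmin]
    · rintro m ⟨w, hw, _⟩; simp at hw
  | append_singleton l v ih =>
    rw [pv_omin_append]
    by_cases hv : some x ∈ v
    · right
      rcases ih with ⟨hnone, hno⟩ | ⟨n, hsome, hoccn, hmin⟩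
      · refine ⟨pvSzN v, ?_, ?_, ?_⟩
        · simp [hv, hnone, Option.elim]
        · exact (pv_occ_append l v x _).mpr (Or.inr ⟨rfl, hv⟩)
        · intro m hm
          rcases (pv_occ_append l v x m).mp hm with h | ⟨hs, _⟩
          · exact absurd h (hno m)
          · omega
      · refine ⟨min (pvSzN v) n, ?_, ?_, ?_⟩
        · simp only [hv, if_pos, hsome, Option.elim]
          push_cast
          rfl
        · rcases Nat.le_total (pvSzN v) n with h | h
          · rw [min_eq_left h]
            exact (pv_occ_append l v x _).mpr (Or.inr ⟨rfl, hv⟩)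
          · rw [min_eq_right h]
            exact (pv_occ_append l v x _).mpr (Or.inl hoccn)
        · intro m hm
          rcases (pv_occ_append l v x m).mp hm with h | ⟨hs, _⟩
          · have := hmin m h; omega
          · omega
    · rcases ih with ⟨hnone, hno⟩ | ⟨n, hsome, hoccn, hmin⟩
      · left
        refine ⟨by simp [hv, hnone], ?_⟩
        intro m hm
        rcases (pv_occ_append l v x m).mp hm with h | ⟨_, hx⟩
        · exact hno m h
        · exact hv hx
      · right
        refine ⟨n, by simp [hv, hsome], (pv_occ_append l v x n).mpr (Or.inl hoccn), ?_⟩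
        intro m hm
        rcases (pv_occ_append l v x m).mp hm with h | ⟨_, hx⟩
        · exact hmin m h
        · exact absurd hx hv

theorem pv_omin_none_iff (l : List (List (Option Int))) (x : Int) :
    pvOmin l x = none ↔ ∀ v ∈ l, some x ∉ v := by
  rcases pv_omin_spec l x with ⟨h1, h2⟩ | ⟨n, h1, h2, _⟩
  · refine ⟨fun _ w hw hx => h2 (pvSzN w) ⟨w, hw, rfl, hx⟩, fun _ => h1⟩
  · constructor
    · intro h; rw [h] at h1; cases h1
    · intro h
      obtain ⟨w, hw, _, hx⟩ := h2
      exact absurd hx (h w hw)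

theorem pv_omin_eq_some_iff (l : List (List (Option Int))) (x : Int) (n : Nat) :
    pvOmin l x = some (n : Int) ↔ pvOcc l x n ∧ ∀ m, pvOcc l x m → n ≤ m := by
  rcases pv_omin_spec l x with ⟨h1, h2⟩ | ⟨n', h1, h2, h3⟩
  · rw [h1]
    constructor
    · intro h; cases h
    · rintro ⟨h, _⟩; exact absurd h (h2 n)
  · rw [h1]
    constructor
    · intro h
      have : n' = n := by exact_mod_cast Option.some.inj h
      subst this; exact ⟨h2, h3⟩
    · rintro ⟨h4, h5⟩
      have e1 := h3 n h4
      have e2 := h5 n' h2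
      have : n' = n := le_antisymm e1 e2
      subst this; rfl

-- B's inner per-tuple update of the min-size dict
def pvInner (s : Int) (d : PySem.Dict Int Int) (v : List (Option Int)) : PySem.Dict Int Int :=
  v.foldl
    (fun d idx =>
      match idx with
      | none => d
      | some x => if !(d.contains x) || s < d.getD x 0 then d.insert x s else d)
    d

def pvBfold (l : List (List (Option Int))) : PySem.Dict Int Int :=
  l.foldl (fun d value => pvInner (pvTupleSize value) d value) PySem.Dict.empty

theorem pv_inner_get (v : List (Option Int)) (s : Int) (d : PySem.Dict Int Int) (x : Int) :
    (pvInner s d v).get? x =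
      if some x ∈ v then some ((d.get? x).elim s (min s)) else d.get? x := by
  induction v generalizing d with
  | nil => simp [pvInner]
  | cons hd tl ih =>
    unfold pvInner at ih ⊢
    cases hd with
    | none =>
      rw [List.foldl_cons]
      simp only [List.mem_cons]
      rw [ih]
      simp
    | some y =>
      rw [List.foldl_cons]
      simp only [List.mem_cons, Option.some.injEq]
      by_cases hyx : x = y
      · subst hyx
        by_cases hc : (!(d.contains x) || decide (s < d.getD x 0)) = true
        · simp only [hc, if_pos]
          rw [ih]
          rw [PySem.Dict.contains_eq_isSome_get?, PySem.Dict.getD_eq_get?_getD] at hc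
          cases hdx : d.get? x with
          | none =>
            simp [PySem.Dict.get?_insert_self, Option.elim, min_self]
          | some t =>
            rw [hdx] at hc
            simp only [Option.isSome_some, Bool.not_true, Bool.false_or, decide_eq_true_eq, Option.getD_some] at hc
            have : min s t = s := min_eq_left (le_of_lt hc)
            simp [PySem.Dict.get?_insert_self, Option.elim, this, min_self]
        · simp only [hc, if_neg, Bool.not_eq_true]
          rw [ih]
          rw [PySem.Dict.contains_eq_isSome_get?, PySem.Dict.getD_eq_get?_getD] at hc
          cases hdx : d.get? x with
          | none => rw [hdx] at hc; simp at hc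
          | some t =>
            rw [hdx] at hc
            simp only [Option.isSome_some, Bool.not_true, Bool.false_or, decide_eq_true_eq, Option.getD_some] at hc
            push Not at hc
            have hmin : min s t = t := min_eq_right (by omega)
            simp [Option.elim, hmin]
      · -- x ≠ y: the step touches only key y
        have hget : ∀ (d' : PySem.Dict Int Int),
            ((if (!(d'.contains y) || decide (s < d'.getD y 0)) = true then d'.insert y s else d')).get? x = d'.get? x := by
          intro d'
          split
          · exact PySem.Dict.get?_insert_of_ne d' s (fun h => hyx h)
          · rfl
        rw [ih, hget]
        simp [hyx]

theorem pv_bfold_get (l : List (List (Option Int))) (x : Int) :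
    (pvBfold l).get? x = pvOmin l x := by
  induction l using List.reverseRecOn with
  | nil => simp [pvBfold, pvOmin, PySem.Dict.get?_empty]
  | append_singleton l v ih =>
    unfold pvBfold at ih ⊢
    rw [List.foldl_append, List.foldl_cons, List.foldl_nil]
    show (pvInner (pvTupleSize v) _ v).get? x = _
    rw [pv_inner_get, pv_omin_append, ih, pv_tsize_eq]

theorem pv_inner_nodup (v : List (Option Int)) (s : Int) (d : PySem.Dict Int Int)
    (h : d.keys.Nodup) : (pvInner s d v).keys.Nodup := by
  induction v generalizing d with
  | nil => exact h
  | cons hd tl ih =>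
    unfold pvInner at ih ⊢
    cases hd with
    | none => exact ih d h
    | some y =>
      rw [List.foldl_cons]
      by_cases hc : (!(d.contains y) || decide (s < d.getD y 0)) = true
      · simp only [hc, if_pos]
        exact ih _ (PySem.Dict.nodup_keys_insert d y s h)
      · simp only [hc, if_neg, Bool.not_eq_true]
        exact ih _ h

theorem pv_bfold_nodup (l : List (List (Option Int))) : (pvBfold l).keys.Nodup := by
  unfold pvBfold
  induction l using List.reverseRecOn with
  | nil => exact PySem.Dict.nodup_keys_empty
  | append_singleton l v ih =>
    rw [List.foldl_append, List.foldl_cons, List.foldl_nil]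
    exact pv_inner_nodup v _ _ ih

theorem pv_foldl_max_cast (rest : List (List (Option Int))) (a : Nat) :
    (rest.map pvTupleSize).foldl max ((a : Nat) : Int)
      = ((rest.foldl (fun m v => max m (pvSzN v)) a : Nat) : Int) := by
  induction rest generalizing a with
  | nil => rfl
  | cons v t ih =>
    rw [List.map_cons, List.foldl_cons, List.foldl_cons, pv_tsize_eq, ← Nat.cast_max, ih]

theorem pv_maxA_eq (v : List (Option Int)) (rest : List (List (Option Int))) :
    (PySem.List.max? ((v :: rest).map pvTupleSize) (fun x => x)).getD 0
      = ((pvMaxN (v :: rest) : Nat) : Int) := by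
  rw [List.map_cons, PySem.List.max?_id_cons]
  unfold pvMaxN
  rw [List.foldl_cons]
  have : pvTupleSize v = (((max 0 (pvSzN v) : Nat)) : Int) := by
    rw [pv_tsize_eq]; omega
  rw [Option.getD_some, this, pv_foldl_max_cast]

theorem pv_maxB_eq (l : List (List (Option Int))) (a : Nat) :
    l.foldl (fun m v => if pvTupleSize v > m then pvTupleSize v else m) ((a : Nat) : Int)
      = ((l.foldl (fun m v => max m (pvSzN v)) a : Nat) : Int) := by
  induction l generalizing a with
  | nil => rfl
  | cons v t ih =>
    rw [List.foldl_cons, List.foldl_cons]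
    have : (if pvTupleSize v > ((a : Nat) : Int) then pvTupleSize v else ((a:Nat):Int))
        = ((max a (pvSzN v) : Nat) : Int) := by
      rw [pv_tsize_eq]
      split <;> push_cast <;> omega
    rw [this, ih]

theorem pv_getD_set (l : List (PySem.Set Int)) (k n : Nat) (a : PySem.Set Int)
    (h : k < l.length) (d : PySem.Set Int) :
    (l.set k a).getD n d = if n = k then a else l.getD n d := by
  rw [List.getD_eq_getElem?_getD, List.getD_eq_getElem?_getD]
  by_cases hn : n = k
  · subst hn
    rw [List.getElem?_set_self (by omega)]
    simp
  · rw [List.getElem?_set_ne (by omega)]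
    simp [hn]

def pvAstep (obs : List (PySem.Set Int)) (value : List (Option Int)) : List (PySem.Set Int) :=
  PySem.List.pySetD obs (pvTupleSize value)
    (PySem.Set.union (PySem.List.pyGetD obs (pvTupleSize value) PySem.Set.empty)
      (PySem.Set.ofList (value.filterMap (fun idx => idx))))

theorem pv_astep_eq (obs : List (PySem.Set Int)) (value : List (Option Int)) :
    pvAstep obs value = obs.set (pvSzN value)
      (PySem.Set.union (obs.getD (pvSzN value) PySem.Set.empty)
        (PySem.Set.ofList (value.filterMap (fun idx => idx)))) := by
  unfold pvAstep
  rw [pv_tsize_eq, PySem.List.pySetD_natCast, PySem.List.pyGetD_natCast]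

theorem pv_obs_inv (l : List (List (Option Int))) (obs : List (PySem.Set Int))
    (hlen : ∀ v ∈ l, pvSzN v < obs.length)
    (hnd : ∀ n, (obs.getD n PySem.Set.empty).Nodup) :
    (∀ n, ((l.foldl pvAstep obs).getD n PySem.Set.empty).Nodup) ∧
    (∀ (n : Nat) (x : Int), x ∈ (l.foldl pvAstep obs).getD n PySem.Set.empty ↔
      x ∈ obs.getD n PySem.Set.empty ∨ pvOcc l x n) := by
  induction l generalizing obs with
  | nil =>
    refine ⟨hnd, fun n x => ?_⟩
    simp [pvOcc]
  | cons v t ih =>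
    rw [List.foldl_cons]
    have hv : pvSzN v < obs.length := hlen v (List.mem_cons_self)
    have hlen' : ∀ w ∈ t, pvSzN w < (pvAstep obs v).length := by
      intro w hw
      rw [pv_astep_eq, List.length_set]
      exact hlen w (List.mem_cons_of_mem v hw)
    have hgetD : ∀ n, (pvAstep obs v).getD n PySem.Set.empty =
        if n = pvSzN v then PySem.Set.union (obs.getD (pvSzN v) PySem.Set.empty)
          (PySem.Set.ofList (v.filterMap (fun idx => idx)))
        else obs.getD n PySem.Set.empty := by
      intro n
      rw [pv_astep_eq, pv_getD_set _ _ _ _ hv]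
    have hnd' : ∀ n, ((pvAstep obs v).getD n PySem.Set.empty).Nodup := by
      intro n
      rw [hgetD n]
      split
      · exact PySem.Set.nodup_union _ _ (hnd _)
      · exact hnd n
    obtain ⟨ih1, ih2⟩ := ih (pvAstep obs v) hlen' hnd'
    refine ⟨ih1, fun n x => ?_⟩
    rw [ih2 n x, hgetD n]
    have hocc : pvOcc (v :: t) x n ↔ (pvSzN v = n ∧ some x ∈ v) ∨ pvOcc t x n := by
      unfold pvOcc
      constructor
      · rintro ⟨w, hw, hs, hx⟩
        rcases List.mem_cons.mp hw with h | h
        · subst h; exact Or.inl ⟨hs, hx⟩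
        · exact Or.inr ⟨w, h, hs, hx⟩
      · rintro (⟨hs, hx⟩ | ⟨w, hw, hs, hx⟩)
        · exact ⟨v, List.mem_cons_self, hs, hx⟩
        · exact ⟨w, List.mem_cons_of_mem v hw, hs, hx⟩
    rw [hocc]
    by_cases hn : n = pvSzN v
    · subst hn
      rw [if_pos rfl, PySem.Set.mem_union, PySem.Set.mem_ofList, pv_mem_filterMap_id]
      tauto
    · rw [if_neg hn]
      have : ¬ (pvSzN v = n ∧ some x ∈ v) := fun ⟨h, _⟩ => hn h.symm
      tauto

theorem pv_len_eq_of_mem_iff {s t : List Int} (hs : s.Nodup) (ht : t.Nodup)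
    (h : ∀ x, x ∈ s ↔ x ∈ t) : s.length = t.length :=
  ((List.perm_ext_iff_of_nodup hs ht).mpr h).length_eq

def pvAllIdx (l : List (List (Option Int))) : PySem.Set Int :=
  PySem.Set.ofList (l.flatMap (fun v => v.filterMap (fun o => o)))
def pvCnt (l : List (List (Option Int))) (j : Int) : Nat :=
  ((pvAllIdx l).filter (fun x => pvOmin l x == some j)).length
def pvCanon (l : List (List (Option Int))) (k : Int) : Int :=
  (PySem.List.pyRange 1 k 1).foldl (fun t i => t + pvCeildiv ((pvCnt l i : Nat) : Int) i) 0

theorem pv_mem_allIdx (l : List (List (Option Int))) (x : Int) :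
    x ∈ pvAllIdx l ↔ ∃ v ∈ l, some x ∈ v := by
  unfold pvAllIdx
  rw [PySem.Set.mem_ofList, List.mem_flatMap]
  constructor
  · rintro ⟨v, hv, hx⟩; exact ⟨v, hv, (pv_mem_filterMap_id v x).mp hx⟩
  · rintro ⟨v, hv, hx⟩; exact ⟨v, hv, (pv_mem_filterMap_id v x).mpr hx⟩

theorem pv_avail_char (l : List (List (Option Int))) (S C : PySem.Set Int) (k : Nat)
    (hS : ∀ x, x ∈ S ↔ pvOcc l x k)
    (hSnd : S.Nodup)
    (hC : ∀ x, x ∈ C ↔ ∃ j : Nat, 1 ≤ j ∧ j < k ∧ pvOcc l x j) :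
    (PySem.Set.diff S C).Nodup ∧
    (∀ x, x ∈ PySem.Set.diff S C ↔ pvOmin l x = some (k : Int)) ∧
    PySem.Set.len (PySem.Set.diff S C) = ((pvCnt l (k : Int) : Nat) : Int) := by
  have hmem : ∀ x, x ∈ PySem.Set.diff S C ↔ pvOmin l x = some (k : Int) := by
    intro x
    rw [PySem.Set.mem_diff, hS x, hC x, pv_omin_eq_some_iff]
    constructor
    · rintro ⟨hk, hnc⟩
      refine ⟨hk, fun m hm => ?_⟩
      by_contra hlt
      exact hnc ⟨m, pv_occ_pos hm, by omega, hm⟩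
    · rintro ⟨hk, hmin⟩
      refine ⟨hk, ?_⟩
      rintro ⟨j, h1, h2, hj⟩
      have := hmin j hj; omega
  have hnd : (PySem.Set.diff S C).Nodup := PySem.Set.nodup_diff S C hSnd
  refine ⟨hnd, hmem, ?_⟩
  have hnd2 : ((pvAllIdx l).filter (fun x => pvOmin l x == some (k : Int))).Nodup :=
    (PySem.Set.nodup_ofList _).filter _
  have hlen : (PySem.Set.diff S C).length
      = ((pvAllIdx l).filter (fun x => pvOmin l x == some (k : Int))).length := by
    apply pv_len_eq_of_mem_iff hnd hnd2
    intro x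
    rw [hmem x, List.mem_filter]
    constructor
    · intro h
      have hocc : pvOcc l x k := ((pv_omin_eq_some_iff l x k).mp h).1
      obtain ⟨v, hv, _, hx⟩ := hocc
      exact ⟨(pv_mem_allIdx l x).mpr ⟨v, hv, hx⟩, by simp [h]⟩
    · rintro ⟨_, h⟩
      simpa using h
  show ((PySem.Set.diff S C).length : Int) = _
  rw [hlen]; rfl

theorem pv_sweep (l : List (List (Option Int))) (obs : List (PySem.Set Int))
    (hmem : ∀ (n : Nat) (x : Int), x ∈ obs.getD n PySem.Set.empty ↔ pvOcc l x n)
    (hnd : ∀ n, (obs.getD n PySem.Set.empty).Nodup) (k : Nat) :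
    (((PySem.List.pyRange 1 (k : Int) 1).foldl
      (fun (st : PySem.Set Int × Int) i =>
        let available := PySem.Set.diff (PySem.List.pyGetD obs i PySem.Set.empty) st.1
        (PySem.Set.union st.1 available, st.2 + pvCeildiv (PySem.Set.len available) i))
      (PySem.Set.empty, 0)).1.Nodup) ∧
    (∀ x, x ∈ ((PySem.List.pyRange 1 (k : Int) 1).foldl
      (fun (st : PySem.Set Int × Int) i =>
        let available := PySem.Set.diff (PySem.List.pyGetD obs i PySem.Set.empty) st.1
        (PySem.Set.union st.1 available, st.2 + pvCeildiv (PySem.Set.len available) i))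
      (PySem.Set.empty, 0)).1 ↔ ∃ j : Nat, 1 ≤ j ∧ j < k ∧ pvOcc l x j) ∧
    ((PySem.List.pyRange 1 (k : Int) 1).foldl
      (fun (st : PySem.Set Int × Int) i =>
        let available := PySem.Set.diff (PySem.List.pyGetD obs i PySem.Set.empty) st.1
        (PySem.Set.union st.1 available, st.2 + pvCeildiv (PySem.Set.len available) i))
      (PySem.Set.empty, 0)).2 = pvCanon l (k : Int) := by
  induction k with
  | zero =>
    have h0 : PySem.List.pyRange 1 ((0 : Nat) : Int) 1 = [] := PySem.List.pyRange_one_eq_nil (by omega)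
    rw [h0]
    refine ⟨List.nodup_nil, fun x => ?_, by simp [pvCanon]⟩
    simp
  | succ k ih =>
    by_cases hk : k = 0
    · subst hk
      have h1 : PySem.List.pyRange 1 ((0+1 : Nat) : Int) 1 = [] :=
        PySem.List.pyRange_one_eq_nil (by norm_num)
      rw [h1]
      refine ⟨List.nodup_nil, fun x => ?_, by simp [pvCanon]⟩
      simp only [List.foldl_nil]
      constructor
      · intro h; simp at h
      · rintro ⟨j, hj1, hj2, _⟩; omega
    · have hsplit : PySem.List.pyRange 1 ((k+1 : Nat) : Int) 1
          = PySem.List.pyRange 1 (k : Int) 1 ++ [(k : Int)] := by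
        push_cast
        exact PySem.List.pyRange_one_succ_right (by omega)
      obtain ⟨ihnd, ihmem, ihval⟩ := ih
      have hobs : PySem.List.pyGetD obs ((k : Nat) : Int) PySem.Set.empty
          = obs.getD k PySem.Set.empty := PySem.List.pyGetD_natCast obs k _
      obtain ⟨hand, hamem, halen⟩ := pv_avail_char l (obs.getD k PySem.Set.empty) _ k
        (hmem k) (hnd k) ihmem
      rw [hsplit]
      simp only [List.foldl_append, List.foldl_cons, List.foldl_nil]
      rw [hobs]
      refine ⟨PySem.Set.nodup_union _ _ ihnd, fun x => ?_, ?_⟩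
      · rw [PySem.Set.mem_union, ihmem x, hamem x]
        constructor
        · rintro (⟨j, h1, h2, h3⟩ | h)
          · exact ⟨j, h1, by omega, h3⟩
          · have hocc := ((pv_omin_eq_some_iff l x k).mp h).1
            exact ⟨k, pv_occ_pos hocc, by omega, hocc⟩
        · rintro ⟨j, h1, h2, h3⟩
          by_cases hjk : j < k
          · exact Or.inl ⟨j, h1, hjk, h3⟩
          · have hj : j = k := by omega
            have h3' : pvOcc l x k := hj ▸ h3
            by_cases hc : ∃ j' : Nat, 1 ≤ j' ∧ j' < k ∧ pvOcc l x j'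
            · obtain ⟨j', a1, a2, a3⟩ := hc
              exact Or.inl ⟨j', a1, a2, a3⟩
            · right
              rw [pv_omin_eq_some_iff]
              refine ⟨h3', fun m hm => ?_⟩
              by_contra hmk
              exact hc ⟨m, pv_occ_pos hm, by omega, hm⟩
      · rw [halen, ihval]
        unfold pvCanon
        rw [hsplit, List.foldl_append, List.foldl_cons, List.foldl_nil]

theorem pv_values_count (l : List (List (Option Int))) (j : Int) :
    (pvBfold l).values.count j = pvCnt l j := by
  have hnd := pv_bfold_nodup l
  rw [PySem.Dict.values_eq_map_keys (pvBfold l) hnd 0]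
  rw [List.count_eq_countP, List.countP_map, List.countP_eq_length_filter]
  unfold pvCnt
  apply pv_len_eq_of_mem_iff (hnd.filter _) ((PySem.Set.nodup_ofList _).filter _)
  intro x
  rw [List.mem_filter, List.mem_filter]
  have hkeys : x ∈ (pvBfold l).keys ↔ ¬ (pvOmin l x = none) := by
    rw [← pv_bfold_get l x]
    constructor
    · intro h hn
      exact ((PySem.Dict.get?_eq_none_iff_not_mem_keys (pvBfold l) x).mp hn) h
    · intro h
      by_contra hmem
      exact h ((PySem.Dict.get?_eq_none_iff_not_mem_keys (pvBfold l) x).mpr hmem)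
  constructor
  · rintro ⟨hx, hp⟩
    have homin : ¬ (pvOmin l x = none) := hkeys.mp hx
    cases hov : pvOmin l x with
    | none => exact absurd hov homin
    | some t =>
      have hgd : (pvBfold l).getD x 0 = t := by
        rw [PySem.Dict.getD_eq_get?_getD, pv_bfold_get, hov]; rfl
      simp only [Function.comp_apply, beq_iff_eq, hgd] at hp
      subst hp
      have hocc := pv_omin_none_iff l x
      refine ⟨?_, by simp⟩
      rw [show (PySem.Set.ofList (List.flatMap (fun v => List.filterMap (fun o => o) v) l)) = pvAllIdx l from rfl, pv_mem_allIdx]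
      by_contra hno
      push Not at hno
      exact homin (hocc.mpr hno)
  · rintro ⟨hx, hp⟩
    have hov : pvOmin l x = some j := by simpa using hp
    refine ⟨hkeys.mpr (by simp [hov]), ?_⟩
    have hgd : (pvBfold l).getD x 0 = j := by
      rw [PySem.Dict.getD_eq_get?_getD, pv_bfold_get, hov]; rfl
    simp [Function.comp_apply, hgd]


theorem pv_getD_mapconst (r : List Int) (n : Nat) :
    (List.map (fun _ => (PySem.Set.empty : PySem.Set Int)) r).getD n PySem.Set.empty
      = PySem.Set.empty := by
  rw [List.getD_eq_getElem?_getD, List.getElem?_map]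
  cases r[n]? <;> rfl

theorem pvA_eq (l : List (List (Option Int))) (h : l ≠ []) :
    bound_largest_combination_py l
      = pvCanon l ((pvMaxN l : Nat) : Int)
        + PySem.Int.floordiv ((pvCnt l ((pvMaxN l : Nat) : Int) : Nat) : Int) ((pvMaxN l : Nat) : Int) := by
  obtain ⟨v, rest, rfl⟩ := List.exists_cons_of_ne_nil h
  have hstep : (fun (obs : List (PySem.Set Int)) value => PySem.List.pySetD obs (pvTupleSize value)
      (PySem.Set.union (PySem.List.pyGetD obs (pvTupleSize value) PySem.Set.empty)
        (PySem.Set.ofList (value.filterMap (fun idx => idx))))) = pvAstep := rfl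
  unfold bound_largest_combination_py
  rw [if_neg h]
  simp only [pv_maxA_eq, hstep]
  set M := pvMaxN (v :: rest) with hM
  set obsE := List.foldl pvAstep
      (List.map (fun _ => (PySem.Set.empty : PySem.Set Int)) (PySem.List.pyRange 0 ((M : Int) + 1)))
      (v :: rest) with hobsE
  set F := (fun (st : PySem.Set Int × Int) i =>
      (PySem.Set.union st.1 (PySem.Set.diff (PySem.List.pyGetD obsE i PySem.Set.empty) st.1),
        st.2 + pvCeildiv (PySem.Set.len (PySem.Set.diff (PySem.List.pyGetD obsE i PySem.Set.empty) st.1)) i)) with hF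
  have hlen0 : ∀ w ∈ (v :: rest), pvSzN w <
      (List.map (fun _ => (PySem.Set.empty : PySem.Set Int)) (PySem.List.pyRange 0 ((M : Int) + 1))).length := by
    intro w hw
    rw [List.length_map, PySem.List.length_pyRange_one]
    have hle : pvSzN w ≤ M := (PySem.List.le_foldl_max_nat (v :: rest) pvSzN 0).2 w hw
    omega
  have hnd0 : ∀ n, ((List.map (fun _ => (PySem.Set.empty : PySem.Set Int))
      (PySem.List.pyRange 0 ((M : Int) + 1))).getD n PySem.Set.empty).Nodup := by
    intro n
    rw [pv_getD_mapconst]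
    exact List.nodup_nil
  obtain ⟨hndF, hmemF⟩ := pv_obs_inv (v :: rest) _ hlen0 hnd0
  have hmem' : ∀ (n : Nat) (x : Int), x ∈ obsE.getD n PySem.Set.empty ↔ pvOcc (v :: rest) x n := by
    intro n x
    rw [hmemF n x, pv_getD_mapconst]
    simp [PySem.Set.empty]
  have hsw := pv_sweep (v :: rest) obsE hmem' hndF M
  have sval : (List.foldl F (PySem.Set.empty, 0) (PySem.List.pyRange 1 (M : Int))).2
      = pvCanon (v :: rest) (M : Int) := hsw.2.2
  have smem : ∀ x, x ∈ (List.foldl F (PySem.Set.empty, 0) (PySem.List.pyRange 1 (M : Int))).1 ↔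
      ∃ j : Nat, 1 ≤ j ∧ j < M ∧ pvOcc (v :: rest) x j := hsw.2.1
  obtain ⟨hand, hamem, halen⟩ := pv_avail_char (v :: rest) (obsE.getD M PySem.Set.empty) _ M
    (hmem' M) (hndF M) smem
  rw [sval, PySem.List.pyGetD_natCast, halen]

theorem pv_countsD (l : List (List (Option Int))) (j : Int) :
    ((pvBfold l).values.foldl (fun c s => c.insert s (c.getD s 0 + 1)) PySem.Dict.empty).getD j 0
      = ((pvCnt l j : Nat) : Int) := by
  rw [PySem.Dict.getD_foldl_insert_add_one, PySem.Dict.getD_empty, pv_values_count]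
  simp

theorem pv_bpair (l : List (List (Option Int))) :
    List.foldl
      (fun (st : PySem.Dict Int Int × Int) value =>
        let size := pvTupleSizeAlt value
        let max_size := if size > st.2 then size else st.2
        let min_size := value.foldl
          (fun d idx =>
            match idx with
            | none => d
            | some x => if !(d.contains x) || size < d.getD x 0 then d.insert x size else d)
          st.1
        (min_size, max_size))
      (PySem.Dict.empty, 0) l
      = (pvBfold l, ((pvMaxN l : Nat) : Int)) := by
  have hl : (fun (st : PySem.Dict Int Int × Int) value =>
        let size := pvTupleSizeAlt value
        let max_size := if size > st.2 then size else st.2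
        let min_size := value.foldl
          (fun d idx =>
            match idx with
            | none => d
            | some x => if !(d.contains x) || size < d.getD x 0 then d.insert x size else d)
          st.1
        (min_size, max_size))
      = (fun (st : PySem.Dict Int Int × Int) value =>
          (pvInner (pvTupleSize value) st.1 value,
            if pvTupleSize value > st.2 then pvTupleSize value else st.2)) := rfl
  rw [hl, PySem.List.foldl_prod_mk (f := fun d value => pvInner (pvTupleSize value) d value)
    (g := fun m value => if pvTupleSize value > m then pvTupleSize value else m)]
  have h0 : (0 : Int) = ((0 : Nat) : Int) := rfl
  rw [h0, pv_maxB_eq l 0]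
  rfl

theorem pvB_eq (l : List (List (Option Int))) (h : l ≠ []) :
    bound_largest_combination_py_alt l
      = pvCanon l ((pvMaxN l : Nat) : Int)
        + PySem.Int.floordiv ((pvCnt l ((pvMaxN l : Nat) : Int) : Nat) : Int) ((pvMaxN l : Nat) : Int) := by
  unfold bound_largest_combination_py_alt
  rw [if_neg h, pv_bpair]
  simp only [pv_countsD]
  rfl

-- ===== VERDICT (by name: the statement is the Claim_ definition above) =====
theorem bound_largest_combination_py_spec : Claim_equal_bound_largest_combination_py := by
  intro value_list _hdom _hpre
  unfold Spec_bound_largest_combination_py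
  by_cases h : value_list = []
  · subst h; rfl
  · rw [pvA_eq value_list h, pvB_eq value_list h]
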